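-- pv_equiv track=rewrite | github.com/waynesun09/cicaddy | src/cicaddy/notifications/base.py | _get_top_vulnerable_packages
-- ===== SOURCE A (Python) =====
-- from typing import Any, Dict, List, Optional
--
-- def _get_top_vulnerable_packages(
--     vulnerabilities: List[Dict[str, Any]]
-- ) -> List[Dict[str, str]]:
--     """Get top vulnerable packages sorted by severity."""
--     packages = []
--     for vuln in vulnerabilities:
--         packages.append(
--             {
--                 "name": vuln.get("package", "unknown"),
--                 "severity": vuln.get("severity", "unknown"),
--             }
--         )
--
--     # Sort by severity (critical > high > medium > low)
--     severity_order = {"critical": 0, "high": 1, "medium": 2, "low": 3}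
--     packages.sort(key=lambda x: severity_order.get(x["severity"].lower(), 4))
--
--     return packages
-- ===== SOURCE B (Python) =====
-- from typing import Any, Dict, List
--
--
-- def _get_top_vulnerable_packages(
--     vulnerabilities: List[Dict[str, Any]]
-- ) -> List[Dict[str, str]]:
--     """Get top vulnerable packages sorted by severity: one-pass stable bucket sort."""
--     severity_order = {"critical": 0, "high": 1, "medium": 2, "low": 3}
--     buckets = [[], [], [], [], []]
--     for vuln in vulnerabilities:
--         severity = vuln.get("severity", "unknown")
--         buckets[severity_order.get(severity.lower(), 4)].append(
--             {"name": vuln.get("package", "unknown"), "severity": severity}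
--         )
--     return [pkg for bucket in buckets for pkg in bucket]
-- ===== Notes on version B (the rewrite author's own statement) =====
-- stated objective: alternative
-- what changed: Replaces build-then-comparison-sort with a single pass that distributes each entry into one of five severity buckets (critical/high/medium/low/other) and concatenates them, preserving the stable order.
import Mathlib
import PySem

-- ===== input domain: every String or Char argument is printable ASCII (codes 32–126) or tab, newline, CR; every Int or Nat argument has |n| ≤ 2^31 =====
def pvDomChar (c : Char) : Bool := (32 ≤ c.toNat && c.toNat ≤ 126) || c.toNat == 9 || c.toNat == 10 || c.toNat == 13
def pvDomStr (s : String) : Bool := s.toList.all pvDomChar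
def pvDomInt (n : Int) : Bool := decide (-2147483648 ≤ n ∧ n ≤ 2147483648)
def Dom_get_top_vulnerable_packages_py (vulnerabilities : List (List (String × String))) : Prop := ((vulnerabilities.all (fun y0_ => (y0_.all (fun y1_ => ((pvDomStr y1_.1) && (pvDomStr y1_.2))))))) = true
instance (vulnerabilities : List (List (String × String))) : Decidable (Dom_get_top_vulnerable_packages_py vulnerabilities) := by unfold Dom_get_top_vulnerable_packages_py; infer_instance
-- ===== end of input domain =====

-- B replaces A's build-then-sort by a one-pass stable bucket sort over the five severity ranks (alternative algorithm, same measured cost).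

-- shared helpers (both Pythons build the same severity_order dict and the same entry dict)
def pvSevOrder : PySem.Dict String Int := PySem.Dict.mk [("critical", 0), ("high", 1), ("medium", 2), ("low", 3)]
def pvRank (s : String) : Int := pvSevOrder.getD (PySem.Str.lower s) 4
def pvEntry (vuln : List (String × String)) : List (String × String) :=
  [("name", (PySem.Dict.mk vuln).getD "package" "unknown"),
   ("severity", (PySem.Dict.mk vuln).getD "severity" "unknown")]

-- ===== PORT A =====
-- A's sort key: severity_order.get(x["severity"].lower(), 4); x["severity"] always exists here, the "" default is never used
def pvKeyA (x : List (String × String)) : Int := pvRank (((PySem.Dict.mk x).get? "severity").getD "")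

def get_top_vulnerable_packages_py (vulnerabilities : List (List (String × String))) : List (List (String × String)) :=
  let packages := vulnerabilities.foldl (fun acc vuln => acc ++ [pvEntry vuln]) []
  PySem.List.sorted packages pvKeyA false

-- ===== PORT B =====
def get_top_vulnerable_packages_py_alt (vulnerabilities : List (List (String × String))) : List (List (String × String)) :=
  let bs := vulnerabilities.foldl
    (fun (bs : List (List (String × String)) × List (List (String × String)) × List (List (String × String)) × List (List (String × String)) × List (List (String × String))) vuln =>
      let e := pvEntry vuln
      let r := pvRank ((PySem.Dict.mk vuln).getD "severity" "unknown")
      if r = 0 then (bs.1 ++ [e], bs.2.1, bs.2.2.1, bs.2.2.2.1, bs.2.2.2.2)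
      else if r = 1 then (bs.1, bs.2.1 ++ [e], bs.2.2.1, bs.2.2.2.1, bs.2.2.2.2)
      else if r = 2 then (bs.1, bs.2.1, bs.2.2.1 ++ [e], bs.2.2.2.1, bs.2.2.2.2)
      else if r = 3 then (bs.1, bs.2.1, bs.2.2.1, bs.2.2.2.1 ++ [e], bs.2.2.2.2)
      else (bs.1, bs.2.1, bs.2.2.1, bs.2.2.2.1, bs.2.2.2.2 ++ [e]))
    ([], [], [], [], [])
  bs.1 ++ bs.2.1 ++ bs.2.2.1 ++ bs.2.2.2.1 ++ bs.2.2.2.2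

-- ===== PRECONDITION & SPEC =====
def Spec_get_top_vulnerable_packages_py (vulnerabilities : List (List (String × String))) (out : List (List (String × String))) : Prop := out = get_top_vulnerable_packages_py_alt vulnerabilities
instance (vulnerabilities : List (List (String × String))) (out : List (List (String × String))) : Decidable (Spec_get_top_vulnerable_packages_py vulnerabilities out) := by unfold Spec_get_top_vulnerable_packages_py; infer_instance

-- ===== CLAIM (what is proved, stated in full; the proofs are below) =====
def Claim_equal_get_top_vulnerable_packages_py : Prop := ∀ (vulnerabilities : List (List (String × String))), Dom_get_top_vulnerable_packages_py vulnerabilities → Spec_get_top_vulnerable_packages_py vulnerabilities (get_top_vulnerable_packages_py vulnerabilities)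

-- ===== LEMMAS AND PROOFS =====

theorem pvRank_cases (s : String) : pvRank s = 0 ∨ pvRank s = 1 ∨ pvRank s = 2 ∨ pvRank s = 3 ∨ pvRank s = 4 := by
  unfold pvRank pvSevOrder
  simp only [PySem.Dict.getD, PySem.Dict.get?, List.find?_cons]
  cases "critical" == PySem.Str.lower s <;> cases "high" == PySem.Str.lower s <;>
    cases "medium" == PySem.Str.lower s <;> cases "low" == PySem.Str.lower s <;> simp

theorem pvKeyA_entry (vuln : List (String × String)) :
    pvKeyA (pvEntry vuln) = pvRank ((PySem.Dict.mk vuln).getD "severity" "unknown") := rfl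

theorem pv_insertBy_append_left {α : Type} (before : α → α → Bool) (x : α) (pre suf : List α)
    (h : ∀ y ∈ pre, before x y = false) :
    PySem.List.insertBy before x (pre ++ suf) = pre ++ PySem.List.insertBy before x suf := by
  induction pre with
  | nil => simp
  | cons a t ih =>
    simp only [List.cons_append, PySem.List.insertBy]
    rw [h a (by simp), ih (fun y hy => h y (by simp [hy]))]
    simp

theorem pv_insertBy_all_true {α : Type} (before : α → α → Bool) (x : α) (suf : List α)
    (h : ∀ y ∈ suf, before x y = true) :
    PySem.List.insertBy before x suf = x :: suf := by
  cases suf with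
  | nil => rfl
  | cons a t => simp [PySem.List.insertBy, h a (by simp)]

theorem pv_insert_at {α : Type} (before : α → α → Bool) (x : α) (pre suf : List α)
    (hpre : ∀ y ∈ pre, before x y = false) (hsuf : ∀ y ∈ suf, before x y = true) :
    PySem.List.insertBy before x (pre ++ suf) = pre ++ [x] ++ suf := by
  rw [pv_insertBy_append_left before x pre suf hpre, pv_insertBy_all_true before x suf hsuf]
  simp

theorem pv_sorted_buckets (ps : List (List (String × String))) :
    PySem.List.sorted ps pvKeyA false =
      ps.filter (fun e => pvKeyA e = 0) ++ ps.filter (fun e => pvKeyA e = 1) ++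
      ps.filter (fun e => pvKeyA e = 2) ++ ps.filter (fun e => pvKeyA e = 3) ++
      ps.filter (fun e => pvKeyA e = 4) := by
  induction ps using List.reverseRecOn with
  | nil => rfl
  | append_singleton ps x ih =>
    rw [PySem.List.sorted_eq_foldl_insertBy] at ih ⊢
    rw [List.foldl_append, List.foldl_cons, List.foldl_nil, ih]
    simp only [List.filter_append]
    have h0 : ∀ y ∈ ps.filter (fun e => decide (pvKeyA e = 0)), pvKeyA y = 0 := by
      intro y hy; simpa using List.of_mem_filter hy
    have h1 : ∀ y ∈ ps.filter (fun e => decide (pvKeyA e = 1)), pvKeyA y = 1 := by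
      intro y hy; simpa using List.of_mem_filter hy
    have h2 : ∀ y ∈ ps.filter (fun e => decide (pvKeyA e = 2)), pvKeyA y = 2 := by
      intro y hy; simpa using List.of_mem_filter hy
    have h3 : ∀ y ∈ ps.filter (fun e => decide (pvKeyA e = 3)), pvKeyA y = 3 := by
      intro y hy; simpa using List.of_mem_filter hy
    have h4 : ∀ y ∈ ps.filter (fun e => decide (pvKeyA e = 4)), pvKeyA y = 4 := by
      intro y hy; simpa using List.of_mem_filter hy
    revert h0 h1 h2 h3 h4
    generalize ps.filter (fun e => decide (pvKeyA e = 0)) = F0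
    generalize ps.filter (fun e => decide (pvKeyA e = 1)) = F1
    generalize ps.filter (fun e => decide (pvKeyA e = 2)) = F2
    generalize ps.filter (fun e => decide (pvKeyA e = 3)) = F3
    generalize ps.filter (fun e => decide (pvKeyA e = 4)) = F4
    intro h0 h1 h2 h3 h4
    have hx : pvKeyA x = 0 ∨ pvKeyA x = 1 ∨ pvKeyA x = 2 ∨ pvKeyA x = 3 ∨ pvKeyA x = 4 :=
      pvRank_cases (((PySem.Dict.mk x).get? "severity").getD "")
    rcases hx with h | h | h | h | h
    · rw [show F0 ++ F1 ++ F2 ++ F3 ++ F4 = F0 ++ (F1 ++ F2 ++ F3 ++ F4) by simp,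
          pv_insert_at _ x F0 (F1 ++ F2 ++ F3 ++ F4)
            (by intro y hy; simp [h, h0 y hy])
            (by intro y hy
                simp only [List.append_assoc, List.mem_append] at hy
                rcases hy with hy | hy | hy | hy <;>
                  first
                  | simp [h, h0 y hy] | simp [h, h1 y hy] | simp [h, h2 y hy]
                  | simp [h, h3 y hy] | simp [h, h4 y hy])]
      simp [h]
    · rw [show F0 ++ F1 ++ F2 ++ F3 ++ F4 = (F0 ++ F1) ++ (F2 ++ F3 ++ F4) by simp,
          pv_insert_at _ x (F0 ++ F1) (F2 ++ F3 ++ F4)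
            (by intro y hy
                simp only [List.mem_append] at hy
                rcases hy with hy | hy <;>
                  first
                  | simp [h, h0 y hy] | simp [h, h1 y hy] | simp [h, h2 y hy]
                  | simp [h, h3 y hy] | simp [h, h4 y hy])
            (by intro y hy
                simp only [List.append_assoc, List.mem_append] at hy
                rcases hy with hy | hy | hy <;>
                  first
                  | simp [h, h0 y hy] | simp [h, h1 y hy] | simp [h, h2 y hy]
                  | simp [h, h3 y hy] | simp [h, h4 y hy])]
      simp [h]
    · rw [show F0 ++ F1 ++ F2 ++ F3 ++ F4 = (F0 ++ F1 ++ F2) ++ (F3 ++ F4) by simp,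
          pv_insert_at _ x (F0 ++ F1 ++ F2) (F3 ++ F4)
            (by intro y hy
                simp only [List.append_assoc, List.mem_append] at hy
                rcases hy with hy | hy | hy <;>
                  first
                  | simp [h, h0 y hy] | simp [h, h1 y hy] | simp [h, h2 y hy]
                  | simp [h, h3 y hy] | simp [h, h4 y hy])
            (by intro y hy
                simp only [List.mem_append] at hy
                rcases hy with hy | hy <;>
                  first
                  | simp [h, h0 y hy] | simp [h, h1 y hy] | simp [h, h2 y hy]
                  | simp [h, h3 y hy] | simp [h, h4 y hy])]
      simp [h]
    · rw [show F0 ++ F1 ++ F2 ++ F3 ++ F4 = (F0 ++ F1 ++ F2 ++ F3) ++ F4 by simp,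
          pv_insert_at _ x (F0 ++ F1 ++ F2 ++ F3) F4
            (by intro y hy
                simp only [List.append_assoc, List.mem_append] at hy
                rcases hy with hy | hy | hy | hy <;>
                  first
                  | simp [h, h0 y hy] | simp [h, h1 y hy] | simp [h, h2 y hy]
                  | simp [h, h3 y hy] | simp [h, h4 y hy])
            (by intro y hy; simp [h, h4 y hy])]
      simp [h]
    · rw [show F0 ++ F1 ++ F2 ++ F3 ++ F4 = (F0 ++ F1 ++ F2 ++ F3 ++ F4) ++ [] by simp,
          pv_insert_at _ x (F0 ++ F1 ++ F2 ++ F3 ++ F4) []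
            (by intro y hy
                simp only [List.append_assoc, List.mem_append] at hy
                rcases hy with hy | hy | hy | hy | hy <;>
                  first
                  | simp [h, h0 y hy] | simp [h, h1 y hy] | simp [h, h2 y hy]
                  | simp [h, h3 y hy] | simp [h, h4 y hy])
            (by intro y hy; simp at hy)]
      simp [h]

theorem pv_fold_buckets (vulns : List (List (String × String)))
    (b0 b1 b2 b3 b4 : List (List (String × String))) :
    vulns.foldl
      (fun (bs : List (List (String × String)) × List (List (String × String)) × List (List (String × String)) × List (List (String × String)) × List (List (String × String))) vuln =>
        let e := pvEntry vuln
        let r := pvRank ((PySem.Dict.mk vuln).getD "severity" "unknown")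
        if r = 0 then (bs.1 ++ [e], bs.2.1, bs.2.2.1, bs.2.2.2.1, bs.2.2.2.2)
        else if r = 1 then (bs.1, bs.2.1 ++ [e], bs.2.2.1, bs.2.2.2.1, bs.2.2.2.2)
        else if r = 2 then (bs.1, bs.2.1, bs.2.2.1 ++ [e], bs.2.2.2.1, bs.2.2.2.2)
        else if r = 3 then (bs.1, bs.2.1, bs.2.2.1, bs.2.2.2.1 ++ [e], bs.2.2.2.2)
        else (bs.1, bs.2.1, bs.2.2.1, bs.2.2.2.1, bs.2.2.2.2 ++ [e]))
      (b0, b1, b2, b3, b4) =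
    (b0 ++ (vulns.map pvEntry).filter (fun e => pvKeyA e = 0),
     b1 ++ (vulns.map pvEntry).filter (fun e => pvKeyA e = 1),
     b2 ++ (vulns.map pvEntry).filter (fun e => pvKeyA e = 2),
     b3 ++ (vulns.map pvEntry).filter (fun e => pvKeyA e = 3),
     b4 ++ (vulns.map pvEntry).filter (fun e => pvKeyA e = 4)) := by
  induction vulns generalizing b0 b1 b2 b3 b4 with
  | nil => simp
  | cons vuln rest ih =>
    have hr : pvRank ((PySem.Dict.mk vuln).getD "severity" "unknown") = pvKeyA (pvEntry vuln) :=
      (pvKeyA_entry vuln).symm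
    have hx : pvKeyA (pvEntry vuln) = 0 ∨ pvKeyA (pvEntry vuln) = 1 ∨ pvKeyA (pvEntry vuln) = 2 ∨
        pvKeyA (pvEntry vuln) = 3 ∨ pvKeyA (pvEntry vuln) = 4 :=
      pvRank_cases (((PySem.Dict.mk (pvEntry vuln)).get? "severity").getD "")
    simp only [List.foldl_cons, List.map_cons, List.filter_cons, hr]
    rcases hx with h | h | h | h | h <;> simp only [h] <;> norm_num <;> rw [ih] <;> simp

-- ===== VERDICT (by name: the statement is the Claim_ definition above) =====
theorem get_top_vulnerable_packages_py_spec : Claim_equal_get_top_vulnerable_packages_py := by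
  intro vulns _
  unfold Spec_get_top_vulnerable_packages_py get_top_vulnerable_packages_py get_top_vulnerable_packages_py_alt
  rw [PySem.List.foldl_append_singleton_eq_map, pv_sorted_buckets, pv_fold_buckets]
  simp
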